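-- pv_equiv track=rewrite | github.com/cogent3/cogent3 | src/cogent3/util/misc.py | get_merged_by_value_coords
-- ===== SOURCE A (Python) =====
-- import contextlib
--
-- def get_run_start_indices(values, digits=None, converter_func=None):
--     """returns starting index, value for all distinct values"""
--     assert not (digits and converter_func), "Cannot set both digits and converter_func"
--
--     if digits is not None:
--
--         def converter_func(x):
--             return round(x, digits)
--
--     elif converter_func is None:
--
--         def converter_func(x):
--             return x
--
--     last_val = None
--     for index, val in enumerate(values):
--         val = converter_func(val)
--         if val != last_val:
--             yield [index, val]
--
--         last_val = val
--
-- def get_merged_by_value_coords(spans_value, digits=None):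
--     """returns adjacent spans merged if they have the same value. Assumes
--     [(start, end, val), ..] structure and that spans_value is sorted in
--     ascending order.
--
--     Parameters
--     ----------
--     digits
--         if None, any data can be handled and exact values are
--         compared. Otherwise values are rounded to that many digits.
--
--     """
--     assert len(spans_value[0]) == 3, "spans_value must have 3 records per row"
--
--     starts, ends, vals = list(zip(*spans_value, strict=False))
--     indices_distinct_vals = get_run_start_indices(vals, digits=digits)
--     data = []
--     for index, val in indices_distinct_vals:
--         start = starts[index]
--         end = ends[index]
--         prev_index = max(index - 1, 0)
--         with contextlib.suppress(IndexError):
--             data[-1][1] = ends[prev_index]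
--
--         data.append([start, end, val])
--
--     if index < len(ends):
--         data[-1][1] = ends[-1]
--
--     return data
-- ===== SOURCE B (Python) =====
-- def get_merged_by_value_coords(spans_value, digits=None):
--     """returns adjacent spans merged if they have the same value. Assumes
--     [(start, end, val), ..] structure and that spans_value is sorted in
--     ascending order."""
--     assert len(spans_value[0]) == 3, "spans_value must have 3 records per row"
--     data = []
--     cur = None  # current group [start, end, val]
--     for start, end, val in spans_value:
--         if digits is not None:
--             val = round(val, digits)
--         if cur is not None and val == cur[2]:
--             cur[1] = end
--         else:
--             if cur is not None:
--                 data.append(cur)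
--             cur = [start, end, val]
--     data.append(cur)
--     return data
-- ===== Notes on version B (the rewrite author's own statement) =====
-- stated objective: simpler
-- what changed: B is one direct accumulator pass over spans_value (keep the open group's start/end/rounded value, flush when the rounded value changes), replacing A's run-start-index generator plus zip'd column tuples, per-run index lookups and after-the-fact patching of data[-1][1].
import Mathlib
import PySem

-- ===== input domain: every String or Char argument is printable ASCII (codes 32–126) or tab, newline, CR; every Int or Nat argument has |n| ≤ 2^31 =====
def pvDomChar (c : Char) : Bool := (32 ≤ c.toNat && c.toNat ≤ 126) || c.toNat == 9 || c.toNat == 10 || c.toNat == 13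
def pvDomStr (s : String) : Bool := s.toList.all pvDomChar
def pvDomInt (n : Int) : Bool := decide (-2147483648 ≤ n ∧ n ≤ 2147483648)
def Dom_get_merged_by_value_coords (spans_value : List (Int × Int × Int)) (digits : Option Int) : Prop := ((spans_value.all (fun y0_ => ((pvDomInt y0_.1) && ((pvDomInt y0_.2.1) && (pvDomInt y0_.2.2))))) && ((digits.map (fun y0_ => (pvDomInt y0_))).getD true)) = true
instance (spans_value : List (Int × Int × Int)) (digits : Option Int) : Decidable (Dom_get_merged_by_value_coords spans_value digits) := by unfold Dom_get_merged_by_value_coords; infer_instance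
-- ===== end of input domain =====

-- B replaces A's run-start-index generator + zipped columns + data[-1] patching by one
-- direct accumulator pass (objective: simpler); same O(n) cost.


-- shared primitive: Python's round(x, d) on ints (round-half-to-even to a multiple of 10^(-d));
-- exact for every x and d (for 0 ≤ d, round(x, d) = x on ints)
def pyRoundInt (x d : Int) : Int :=
  if 0 ≤ d then x
  else
    let m : Int := 10 ^ (-d).toNat
    let q := PySem.Int.floordiv x m
    let r := x - q * m
    if 2 * r < m then q * m
    else if m < 2 * r then (q + 1) * m
    else if PySem.Int.mod q 2 = 0 then q * m else (q + 1) * m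

-- the converter_func A builds from `digits` (identity when digits is None)
def pvConv (digits : Option Int) (x : Int) : Int :=
  match digits with
  | none => x
  | some d => pyRoundInt x d

-- ===== PORT A =====
-- generator get_run_start_indices(vals, digits): enumerate with the last_val sentinel (None at start)
def pvRunsAux (digits : Option Int) (i : Nat) (last : Option Int) : List Int → List (Nat × Int)
  | [] => []
  | v :: vs =>
    let val := pvConv digits v
    if some val ≠ last then (i, val) :: pvRunsAux digits (i + 1) (some val) vs
    else pvRunsAux digits (i + 1) (some val) vs

-- data[-1][1] = v  (with contextlib.suppress(IndexError): a no-op on empty data)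
def pvPatchLast : List (List Int) → Int → List (List Int)
  | [], _ => []
  | [l], v => [l.set 1 v]
  | x :: y :: xs, v => x :: pvPatchLast (y :: xs) v

-- A's `for index, val in indices_distinct_vals` loop
def pvALoop (starts ends_ : List Int) : List (List Int) → List (Nat × Int) → List (List Int)
  | data, [] => data
  | data, (index, val) :: rest =>
    let start := starts.getD index 0        -- starts[index]; index is in range by construction
    let end_ := ends_.getD index 0          -- ends[index]
    let prev := index - 1                   -- max(index - 1, 0): Nat subtraction
    let data' := pvPatchLast data (ends_.getD prev 0)
    pvALoop starts ends_ (data' ++ [[start, end_, val]]) rest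

def get_merged_by_value_coords (spans_value : List (Int × Int × Int)) (digits : Option Int) : List (List Int) :=
  -- assert len(spans_value[0]) == 3 holds by typing (raises IndexError on []: excluded by Pre_)
  let starts := spans_value.map (·.1)
  let ends_ := spans_value.map (·.2.1)
  let vals := spans_value.map (·.2.2)
  let runs := pvRunsAux digits 0 none vals
  let data := pvALoop starts ends_ [] runs
  match runs.getLast? with
  | none => data                       -- Python: `index` unbound (NameError); only on [] — outside Pre_
  | some (index, _) =>
    if index < ends_.length then
      pvPatchLast data (ends_.getD (ends_.length - 1) 0)   -- data[-1][1] = ends[-1]; ends nonempty here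
    else data

-- ===== PORT B =====
-- B: one pass; cur = the open group [start, end, val], flushed when the rounded value changes
def pvBLoop (digits : Option Int) : List (Int × Int × Int) → List (List Int) → Option (Int × Int × Int) → List (List Int)
  | [], data, none => data             -- only reached on []: B's assert raises there — outside Pre_
  | [], data, some (cs, ce, cv) => data ++ [[cs, ce, cv]]
  | (s, e, v) :: rest, data, cur =>
    let val := pvConv digits v
    match cur with
    | none => pvBLoop digits rest data (some (s, e, val))
    | some (cs, ce, cv) =>
      if val = cv then pvBLoop digits rest data (some (cs, e, cv))
      else pvBLoop digits rest (data ++ [[cs, ce, cv]]) (some (s, e, val))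

def get_merged_by_value_coords_alt (spans_value : List (Int × Int × Int)) (digits : Option Int) : List (List Int) :=
  pvBLoop digits spans_value [] none

-- ===== PRECONDITION & SPEC =====
-- Pre_ excludes only the empty spans_value, on which A raises IndexError at spans_value[0] (B's
-- identical assert raises IndexError there too).
def Pre_get_merged_by_value_coords (spans_value : List (Int × Int × Int)) (digits : Option Int) : Prop :=
  spans_value ≠ []
instance (spans_value : List (Int × Int × Int)) (digits : Option Int) : Decidable (Pre_get_merged_by_value_coords spans_value digits) := by unfold Pre_get_merged_by_value_coords; infer_instance

def pvWitness_get_merged_by_value_coords : (List (Int × Int × Int)) × Option Int :=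
  ([(0, 3, 1), (3, 5, 1), (5, 9, 2)], none)

def Spec_get_merged_by_value_coords (spans_value : List (Int × Int × Int)) (digits : Option Int) (out : List (List Int)) : Prop := out = get_merged_by_value_coords_alt spans_value digits
instance (spans_value : List (Int × Int × Int)) (digits : Option Int) (out : List (List Int)) : Decidable (Spec_get_merged_by_value_coords spans_value digits out) := by unfold Spec_get_merged_by_value_coords; infer_instance

-- ===== CLAIM (what is proved, stated in full; the proofs are below) =====
def Claim_equal_get_merged_by_value_coords : Prop := ∀ (spans_value : List (Int × Int × Int)) (digits : Option Int), Dom_get_merged_by_value_coords spans_value digits → Pre_get_merged_by_value_coords spans_value digits → Spec_get_merged_by_value_coords spans_value digits (get_merged_by_value_coords spans_value digits)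

-- ===== LEMMAS AND PROOFS =====

lemma pvPatchLast_append (data : List (List Int)) (a b c v : Int) :
    pvPatchLast (data ++ [[a, b, c]]) v = data ++ [[a, v, c]] := by
  induction data with
  | nil => rfl
  | cons x xs ih =>
    cases xs with
    | nil => rfl
    | cons y ys => simpa [pvPatchLast] using ih

lemma pvRunsAux_idx_lt (digits : Option Int) :
    ∀ (vs : List Int) (i : Nat) (last : Option Int) (p : Nat × Int),
      p ∈ pvRunsAux digits i last vs → p.1 < i + vs.length := by
  intro vs
  induction vs with
  | nil => intro i last p hp; simp [pvRunsAux] at hp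
  | cons v vs ih =>
    intro i last p hp
    simp only [pvRunsAux] at hp
    split at hp
    · rcases List.mem_cons.mp hp with h | h
      · subst h; simp only [List.length_cons]; omega
      · have := ih (i + 1) (some (pvConv digits v)) p h; simp at this ⊢; omega
    · have := ih (i + 1) (some (pvConv digits v)) p hp; simp at this ⊢; omega

lemma pvMain (digits : Option Int) (L : List (Int × Int × Int)) :
    ∀ (rest : List (Int × Int × Int)) (i : Nat) (dataB : List (List Int)) (cs es cv : Int),
      L.drop i = rest → 1 ≤ i → i ≤ L.length →
      pvPatchLast
        (pvALoop (L.map (·.1)) (L.map (·.2.1)) (dataB ++ [[cs, es, cv]])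
          (pvRunsAux digits i (some cv) ((L.map (·.2.2)).drop i)))
        ((L.map (·.2.1)).getD (L.length - 1) 0)
      = pvBLoop digits rest dataB (some (cs, (L.map (·.2.1)).getD (i - 1) 0, cv)) := by
  intro rest
  induction rest with
  | nil =>
    intro i dataB cs es cv hdrop h1 hle
    have hin : i = L.length := by
      have := List.drop_eq_nil_iff.mp hdrop
      omega
    subst hin
    rw [List.drop_eq_nil_iff.mpr (by simp)]
    simp [pvRunsAux, pvALoop, pvBLoop, pvPatchLast_append]
  | cons hd rest ih =>
    intro i dataB cs es cv hdrop h1 hle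
    obtain ⟨s, e, v⟩ := hd
    have hget? : L[i]? = some (s, e, v) := by
      rw [← List.head?_drop, hdrop]; rfl
    have hlt : i < L.length := by
      have hl := congrArg List.length hdrop
      rw [List.length_drop] at hl
      simp only [List.length_cons] at hl
      omega
    have hdrop' : L.drop (i + 1) = rest := by
      rw [← List.tail_drop, hdrop]; rfl
    have hends : (L.map (·.2.1)).getD i 0 = e := by
      simp [List.getD_eq_getElem?_getD, List.getElem?_map, hget?]
    have hstarts : (L.map (·.1)).getD i 0 = s := by
      simp [List.getD_eq_getElem?_getD, List.getElem?_map, hget?]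
    have hvals : (L.map (·.2.2)).drop i = v :: (L.map (·.2.2)).drop (i + 1) := by
      rw [← List.map_drop, ← List.map_drop, hdrop, hdrop']; rfl
    rw [hvals]
    simp only [pvRunsAux]
    by_cases hv : pvConv digits v = cv
    · rw [if_neg (by simp [hv])]
      rw [hv]
      have H := ih (i + 1) dataB cs es cv hdrop' (by omega) (by omega)
      rw [show i + 1 - 1 = i from rfl, hends] at H
      rw [H]
      simp only [pvBLoop]
      rw [if_pos hv]
    · rw [if_pos (by simp [hv])]
      simp only [pvALoop]
      rw [pvPatchLast_append, hstarts, hends]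
      have H := ih (i + 1) (dataB ++ [[cs, (L.map (·.2.1)).getD (i - 1) 0, cv]]) s e
        (pvConv digits v) hdrop' (by omega) (by omega)
      rw [show i + 1 - 1 = i from rfl, hends] at H
      rw [H]
      simp only [pvBLoop]
      rw [if_neg hv]

-- ===== VERDICT (by name: the statement is the Claim_ definition above) =====
theorem get_merged_by_value_coords_spec : Claim_equal_get_merged_by_value_coords := by
  intro sv digits hDom hPre
  unfold Spec_get_merged_by_value_coords
  cases sv with
  | nil => exact absurd rfl hPre
  | cons hd rest =>
    obtain ⟨s, e, v⟩ := hd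
    simp only [get_merged_by_value_coords, get_merged_by_value_coords_alt, List.map_cons]
    simp only [pvRunsAux]
    rw [if_pos (by simp)]
    cases hL : ((0, pvConv digits v) ::
        pvRunsAux digits (0 + 1) (some (pvConv digits v)) (List.map (·.2.2) rest)).getLast? with
    | none => exact absurd (List.getLast?_eq_none_iff.mp hL) (by simp)
    | some p =>
      obtain ⟨idx, w⟩ := p
      have hidx : idx < (List.map (·.2.1) ((s, e, v) :: rest) : List Int).length := by
        rcases List.mem_cons.mp (List.mem_of_getLast? hL) with h | h
        · cases h; simp
        · have := pvRunsAux_idx_lt digits (List.map (·.2.2) rest) (0 + 1)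
            (some (pvConv digits v)) (idx, w) h
          simp only [List.length_map, List.length_cons] at this ⊢
          omega
      dsimp only
      simp only [List.map_cons] at hidx
      rw [if_pos hidx]
      simp only [pvALoop, pvPatchLast]
      have H := pvMain digits ((s, e, v) :: rest) rest 1 [] s e (pvConv digits v)
        (by rfl) (by omega) (by simp)
      simp only [List.map_cons, List.drop_succ_cons, List.drop_zero, List.length_cons,
        Nat.add_sub_cancel, List.getD_cons_zero, List.nil_append, Nat.zero_add,
        List.length_map, ← List.map_drop] at H ⊢
      rw [H]
      simp [pvBLoop]
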